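-- pv_equiv track=rewrite | github.com/Thewatchmann001/TrustSpan | backend/app/services/ai_service.py | _prioritize_skills
-- ===== SOURCE A (Python) =====
-- from typing import Dict, Any, Optional, List
--
-- def _prioritize_skills(user_skills: List[str], job_skills: List[str]) -> List[str]:
--     """Reorder skills to prioritize job-relevant skills."""
--     relevant_skills = []
--     other_skills = []
--
--     job_skills_lower = [s.lower() for s in job_skills]
--
--     for skill in user_skills:
--         if any(js in skill.lower() for js in job_skills_lower):
--             relevant_skills.append(skill)
--         else:
--             other_skills.append(skill)
--
--     return relevant_skills + other_skills
-- ===== SOURCE B (Python) =====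
-- from typing import List
--
-- def _prioritize_skills(user_skills: List[str], job_skills: List[str]) -> List[str]:
--     """Stable sort by a 0/1 relevance key: relevant skills first, original order kept."""
--     job_skills_lower = [s.lower() for s in job_skills]
--
--     def key(skill: str) -> int:
--         return 0 if any(js in skill.lower() for js in job_skills_lower) else 1
--
--     return sorted(user_skills, key=key)
-- ===== Notes on version B (the rewrite author's own statement) =====
-- stated objective: idiomatic
-- what changed: Replaces the explicit two-bucket partition loop and concatenation with a single stable sort over a computed 0/1 relevance key; the bucket order emerges from sort stability instead of being built.
import Mathlib
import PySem

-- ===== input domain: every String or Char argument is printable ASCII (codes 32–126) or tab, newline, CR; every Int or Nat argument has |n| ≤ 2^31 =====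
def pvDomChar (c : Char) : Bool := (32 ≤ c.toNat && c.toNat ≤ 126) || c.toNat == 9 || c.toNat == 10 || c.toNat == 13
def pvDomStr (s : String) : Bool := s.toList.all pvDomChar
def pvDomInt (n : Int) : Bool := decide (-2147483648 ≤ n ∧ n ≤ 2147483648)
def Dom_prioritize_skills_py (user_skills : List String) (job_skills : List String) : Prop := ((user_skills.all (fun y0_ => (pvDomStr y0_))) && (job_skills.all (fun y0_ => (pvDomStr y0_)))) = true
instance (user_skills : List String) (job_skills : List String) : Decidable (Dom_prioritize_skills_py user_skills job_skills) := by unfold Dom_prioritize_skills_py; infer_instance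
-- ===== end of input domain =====

-- B replaces A's explicit two-bucket partition loop with a stable sort over a 0/1 relevance key (idiomatic; same result, return value only).

-- ===== PORT A =====
-- literal port of A: build relevant/other buckets in one pass, then concatenate
def prioritize_skills_py (user_skills : List String) (job_skills : List String) : List String :=
  let job_skills_lower := job_skills.map PySem.Str.lower
  let p := user_skills.foldl
    (fun (acc : List String × List String) skill =>
      if job_skills_lower.any (fun js => PySem.Str.isIn js (PySem.Str.lower skill)) then
        (acc.1 ++ [skill], acc.2)
      else
        (acc.1, acc.2 ++ [skill]))
    ([], [])
  p.1 ++ p.2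

-- ===== PORT B =====
-- literal port of B: stable sort by key 0 (relevant) / 1 (other)
def prioritize_skills_py_alt (user_skills : List String) (job_skills : List String) : List String :=
  let job_skills_lower := job_skills.map PySem.Str.lower
  PySem.List.sorted user_skills
    (fun skill => if job_skills_lower.any (fun js => PySem.Str.isIn js (PySem.Str.lower skill)) then (0 : Int) else 1)
    false

-- ===== PRECONDITION & SPEC =====
def Spec_prioritize_skills_py (user_skills : List String) (job_skills : List String) (out : List String) : Prop := out = prioritize_skills_py_alt user_skills job_skills
instance (user_skills : List String) (job_skills : List String) (out : List String) : Decidable (Spec_prioritize_skills_py user_skills job_skills out) := by unfold Spec_prioritize_skills_py; infer_instance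

-- ===== CLAIM (what is proved, stated in full; the proofs are below) =====
def Claim_equal_prioritize_skills_py : Prop := ∀ (user_skills : List String) (job_skills : List String), Dom_prioritize_skills_py user_skills job_skills → Spec_prioritize_skills_py user_skills job_skills (prioritize_skills_py user_skills job_skills)

-- ===== LEMMAS AND PROOFS =====

-- one unfolding step of PySem's insertion
theorem insertBy_cons {α : Type} (before : α → α → Bool) (x y : α) (ys : List α) :
    PySem.List.insertBy before x (y :: ys)
      = if before x y then x :: y :: ys else y :: PySem.List.insertBy before x ys := rfl

theorem insertBy_append_skip {α : Type} (before : α → α → Bool) (x : α) (F O : List α)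
    (h : ∀ y ∈ F, before x y = false) :
    PySem.List.insertBy before x (F ++ O) = F ++ PySem.List.insertBy before x O := by
  induction F with
  | nil => rfl
  | cons a F ih =>
      rw [List.cons_append, insertBy_cons, if_neg (by simp [h a (by simp)]),
        ih (fun y hy => h y (by simp [hy]))]
      rfl

-- a stable sort by a 0/1-valued key IS the partition: key-0 elements in order, then key-1 elements in order
theorem sorted_two_valued {α : Type} (pred : α → Bool) (xs : List α) :
    PySem.List.sorted xs (fun x => if pred x then (0:Int) else 1) false
      = xs.filter pred ++ xs.filter (fun x => !pred x) := by
  rw [PySem.List.sorted_eq_foldl_insertBy]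
  induction xs using List.reverseRecOn with
  | nil => simp
  | append_singleton xs x ih =>
      rw [List.foldl_append, List.foldl_cons, List.foldl_nil, ih]
      by_cases hx : pred x = true
      · rw [insertBy_append_skip _ x _ _ (by intro y hy; simp at hy; simp [hx, hy.2])]
        cases hO : xs.filter (fun x => !pred x) with
        | nil => simp [PySem.List.insertBy, hx, hO, List.filter_append]
        | cons b O =>
            have hbm : b ∈ xs.filter (fun x => !pred x) := by
              rw [hO]; exact List.mem_cons_self ..
            have hb := (List.mem_filter.mp hbm).2
            rw [insertBy_cons, if_pos (by simp at hb; simp [hx, hb])]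
            simp [List.filter_append, hx, hO]
      · rw [PySem.List.insertBy_of_forall_not_before _ _ _
          (by intro y hy; simp [hx]; split <;> omega)]
        simp [List.filter_append, hx]

-- A's bucket-building fold is the same partition
theorem foldl_partition {α : Type} (pred : α → Bool) (xs : List α) (a b : List α) :
    xs.foldl
      (fun (acc : List α × List α) x =>
        if pred x then (acc.1 ++ [x], acc.2) else (acc.1, acc.2 ++ [x])) (a, b)
      = (a ++ xs.filter pred, b ++ xs.filter (fun x => !pred x)) := by
  induction xs generalizing a b with
  | nil => simp
  | cons x xs ih =>
      by_cases hx : pred x = true <;> simp [hx, ih]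

-- ===== VERDICT (by name: the statement is the Claim_ definition above) =====
theorem prioritize_skills_py_spec : Claim_equal_prioritize_skills_py := by
  intro user_skills job_skills _
  unfold Spec_prioritize_skills_py
  simp only [prioritize_skills_py, prioritize_skills_py_alt]
  rw [sorted_two_valued
        (fun skill => (job_skills.map PySem.Str.lower).any
          (fun js => PySem.Str.isIn js (PySem.Str.lower skill))) user_skills,
      foldl_partition
        (fun skill => (job_skills.map PySem.Str.lower).any
          (fun js => PySem.Str.isIn js (PySem.Str.lower skill))) user_skills [] []]
  rfl
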